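-- pv_equiv track=rewrite | github.com/mahditaharb-maker/myfiles | find_euler_triple.py | find_euler_triple
-- ===== SOURCE A (Python) =====
-- def find_euler_triple(p):
--     # Solve i^2 ≡ -1 mod p
--     targets = [i for i in range(p) if (i * i) % p == p - 1]
--     if not targets:
--         return None
--
--     for i in targets:
--         for e in range(2, p):      # skip trivial e=0,1
--             for pi in range(1, p): # skip π=0 trivializes exponent
--                 if pow(e, i * pi, p) == p - 1:  # e^(i·π) ≡ -1 mod p
--                     return (e, i, pi)
--     return None
-- ===== SOURCE B (Python) =====
-- def find_euler_triple(p):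
--     # For each (i, e): build the orbit of a = e^i mod p as an explicit list of
--     # successive powers (stopping early once the sequence is known to cycle
--     # without reaching p-1: x hits 0 or 1), then look up p-1 by list index.
--     for i in (i for i in range(p) if i * i % p == p - 1):
--         for e in range(2, p):
--             a = pow(e, i, p)
--             powers = []
--             x = a
--             while len(powers) < p - 1:
--                 powers.append(x)
--                 if x in (0, 1):
--                     break
--                 x = x * a % p
--             try:
--                 return (e, i, powers.index(p - 1) + 1)
--             except ValueError:
--                 pass
--     return None
-- ===== Notes on version B (the rewrite author's own statement) =====
-- stated objective: alternative
-- what changed: B replaces A's per-pi modular exponentiations with a build-then-search decomposition: for each (i,e) it materialises the orbit of a=e^i mod p as a list of successive powers (truncated as soon as the sequence provably cycles without reaching p-1, i.e. once it hits 0 or 1) and then finds pi by a single list-index lookup of p-1.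
import Mathlib
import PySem

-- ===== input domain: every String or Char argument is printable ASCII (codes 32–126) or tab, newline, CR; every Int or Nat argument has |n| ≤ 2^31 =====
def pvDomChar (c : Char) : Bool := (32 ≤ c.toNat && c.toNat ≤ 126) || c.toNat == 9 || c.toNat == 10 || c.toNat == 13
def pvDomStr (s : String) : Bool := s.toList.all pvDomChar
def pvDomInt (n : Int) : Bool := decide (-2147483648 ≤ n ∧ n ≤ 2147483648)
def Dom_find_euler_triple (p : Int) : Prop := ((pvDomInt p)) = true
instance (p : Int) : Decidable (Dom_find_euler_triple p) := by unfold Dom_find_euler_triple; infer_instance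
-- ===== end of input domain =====

-- B replaces the per-pi modular exponentiation by a build-then-search decomposition: it
-- materialises the orbit of a = e^i mod p as a list (truncated once the sequence provably
-- cycles without reaching p-1, i.e. hits 0 or 1) and finds pi by one index lookup
-- (alternative decomposition; not measurably faster on the timed inputs).

-- ===== PORT A =====
-- pow(e, m, p) with m ≥ 0 (always the case here: i ≥ 0, pi ≥ 1) is PySem.Int.powMod e m.toNat p
def pvALoopPi (p i e : Int) : List Int → Option (List Int)
  | [] => none
  | pi :: rest =>
    if PySem.Int.powMod e (i * pi).toNat p = p - 1 then some [e, i, pi]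
    else pvALoopPi p i e rest

def pvALoopE (p i : Int) : List Int → Option (List Int)
  | [] => none
  | e :: rest =>
    match pvALoopPi p i e (PySem.List.pyRange 1 p 1) with
    | some r => some r
    | none => pvALoopE p i rest

def pvALoopI (p : Int) : List Int → Option (List Int)
  | [] => none
  | i :: rest =>
    match pvALoopE p i (PySem.List.pyRange 2 p 1) with
    | some r => some r
    | none => pvALoopI p rest

def find_euler_triple (p : Int) : Option (List Int) :=
  let targets := (PySem.List.pyRange 0 p 1).filter (fun i => PySem.Int.mod (i * i) p == p - 1)
  if targets = [] then none
  else pvALoopI p targets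

-- ===== PORT B =====
-- the while loop: append x, stop on x ∈ {0,1} or when p-1 elements are collected (fuel)
def pvBPowers (p a : Int) : Nat → Int → List Int
  | 0, _ => []
  | n + 1, x => x :: (if x = 0 ∨ x = 1 then [] else pvBPowers p a n (PySem.Int.mod (x * a) p))

-- the body of the e-loop: build the orbit, then powers.index(p-1) + 1 (None on ValueError)
def pvBInner (p i e : Int) : Option (List Int) :=
  let a := PySem.Int.powMod e i.toNat p
  match PySem.List.index? (pvBPowers p a (p - 1).toNat a) (p - 1) with
  | some j => some [e, i, (j : Int) + 1]
  | none => none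

def find_euler_triple_alt (p : Int) : Option (List Int) :=
  ((PySem.List.pyRange 0 p 1).filter (fun i => PySem.Int.mod (i * i) p == p - 1)).findSome?
    (fun i => (PySem.List.pyRange 2 p 1).findSome? (pvBInner p i))

-- ===== PRECONDITION & SPEC =====
def Spec_find_euler_triple (p : Int) (out : Option (List Int)) : Prop := out = find_euler_triple_alt p
instance (p : Int) (out : Option (List Int)) : Decidable (Spec_find_euler_triple p out) := by unfold Spec_find_euler_triple; infer_instance

-- ===== CLAIM (what is proved, stated in full; the proofs are below) =====
def Claim_equal_find_euler_triple : Prop := ∀ (p : Int), Dom_find_euler_triple p → Spec_find_euler_triple p (find_euler_triple p)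

-- ===== LEMMAS AND PROOFS =====

-- pow(e, i*pi, p) computes a^pi mod p for a = e^i mod p
lemma pvCheckEq (p i pi e : Int) (hp : 0 < p) (hi : 0 ≤ i) (hpi : 0 ≤ pi) :
    PySem.Int.powMod e (i * pi).toNat p = ((e ^ i.toNat % p) ^ pi.toNat) % p := by
  have h : PySem.Int.powMod e (i * pi).toNat p = PySem.Int.mod (e ^ (i * pi).toNat) p := rfl
  rw [h, PySem.Int.mod_eq_emod_of_pos hp]
  lift i to ℕ using hi
  lift pi to ℕ using hpi
  have hnat : (((i : Int)) * ((pi : Int))).toNat = i * pi := by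
    rw [← Nat.cast_mul, Int.toNat_natCast]
  rw [hnat, pow_mul]
  have hmod : (e ^ i % p) % p = e ^ i % p := Int.emod_emod_of_dvd _ dvd_rfl
  exact ((Int.ModEq.pow pi hmod).symm)

lemma pvALoopPi_none (p i e : Int) (L : List Int)
    (h : ∀ pi ∈ L, PySem.Int.powMod e (i * pi).toNat p ≠ p - 1) :
    pvALoopPi p i e L = none := by
  induction L with
  | nil => rfl
  | cons hd tl ih =>
    rw [pvALoopPi, if_neg (h hd (by simp))]
    exact ih (fun pi hm => h pi (by simp [hm]))

-- if a^M ≡ 1 mod p then powers of a mod p are periodic with period M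
lemma pvPowCycle (a p : Int) (M : Nat) (hM : 1 ≤ M) (h1 : a ^ M % p = 1) :
    ∀ t : Nat, a ^ t % p = a ^ (t % M) % p := by
  intro t
  induction t using Nat.strong_induction_on with
  | _ t ih =>
    by_cases h : t < M
    · rw [Nat.mod_eq_of_lt h]
    · have h : M ≤ t := by omega
      calc a ^ t % p = (a ^ (t - M) * a ^ M) % p := by
            rw [← pow_add, Nat.sub_add_cancel h]
        _ = (a ^ (t - M) % p * (a ^ M % p)) % p := by rw [Int.mul_emod]
        _ = a ^ (t - M) % p % p := by rw [h1, mul_one]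
        _ = a ^ (t - M) % p := Int.emod_emod_of_dvd _ dvd_rfl
        _ = a ^ ((t - M) % M) % p := ih (t - M) (by omega)
        _ = a ^ (t % M) % p := by rw [← Nat.mod_eq_sub_mod h]

-- the rest of A's pi-scan finds nothing once the power sequence cycles through {0,1}
lemma pvATailNone (p i e m : Int) (hp : 3 ≤ p) (hi : 0 ≤ i) (hm : 1 ≤ m)
    (hfail : ∀ j : Int, 1 ≤ j → j < m → ((e ^ i.toNat % p) ^ j.toNat) % p ≠ p - 1)
    (hbrk : (e ^ i.toNat % p) ^ m.toNat % p = 1 ∨ (e ^ i.toNat % p) ^ m.toNat % p = 0) :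
    pvALoopPi p i e (PySem.List.pyRange (m + 1) p 1) = none := by
  set a := e ^ i.toNat % p with ha
  apply pvALoopPi_none
  intro pi hmem
  obtain ⟨hlo, hhi'⟩ := PySem.List.mem_pyRange_one.mp hmem
  rw [pvCheckEq p i pi e (by omega) hi (by omega)]
  have hmt : 1 ≤ m.toNat := by omega
  rcases hbrk with h1 | h0
  · rw [pvPowCycle a p m.toNat hmt h1 pi.toNat]
    rcases Nat.eq_zero_or_pos (pi.toNat % m.toNat) with hr | hr
    · rw [hr, pow_zero]
      rw [Int.emod_eq_of_lt (by omega) (by omega)]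
      omega
    · have hrm : pi.toNat % m.toNat < m.toNat := Nat.mod_lt _ (by omega)
      have := hfail ((pi.toNat % m.toNat : Nat) : Int) (by exact_mod_cast hr) (by omega)
      rw [Int.toNat_natCast] at this
      exact this
  · have hdvd : p ∣ a ^ m.toNat := Int.dvd_of_emod_eq_zero h0
    have : p ∣ a ^ pi.toNat := by
      have : a ^ pi.toNat = a ^ m.toNat * a ^ (pi.toNat - m.toNat) := by
        rw [← pow_add]; congr 1; omega
      rw [this]; exact Dvd.dvd.mul_right hdvd _
    rw [Int.emod_eq_zero_of_dvd this]
    omega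

-- core: A's direct scan over pi ∈ [m, p) equals searching p-1 in B's truncated orbit list
lemma pvInnerEq (p i e : Int) (hp : 3 ≤ p) (hi : 0 ≤ i) :
    ∀ n : Nat, ∀ m : Int, n = (p - m).toNat → 1 ≤ m →
    (∀ j : Int, 1 ≤ j → j < m → ((e ^ i.toNat % p) ^ j.toNat) % p ≠ p - 1) →
    pvALoopPi p i e (PySem.List.pyRange m p 1) =
      (match PySem.List.index?
          (pvBPowers p (e ^ i.toNat % p) (p - m).toNat (((e ^ i.toNat % p) ^ m.toNat) % p))
          (p - 1) with
       | some j => some [e, i, m + (j : Int)]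
       | none => none) := by
  intro n
  induction n using Nat.strong_induction_on with
  | _ n ih =>
    intro m hn hm hfail
    set a := e ^ i.toNat % p with ha
    have hp0 : (0:Int) < p := by omega
    by_cases hmp : p ≤ m
    · rw [PySem.List.pyRange_one_eq_nil hmp]
      have : (p - m).toNat = 0 := by omega
      rw [this]
      simp [pvBPowers, pvALoopPi, PySem.List.index?_eq_idxOf?]
    have hmp : m < p := by omega
    have hfuel : (p - m).toNat = (p - (m + 1)).toNat + 1 := by omega
    rw [PySem.List.pyRange_one_cons hmp, hfuel]
    rw [pvALoopPi, pvBPowers]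
    rw [pvCheckEq p i m e hp0 hi (by omega)]
    by_cases hhit : a ^ m.toNat % p = p - 1
    · rw [if_pos hhit, hhit, PySem.List.index?_cons_self]
      simp
    rw [if_neg hhit, PySem.List.index?_cons_of_ne _ hhit]
    by_cases hbrk : a ^ m.toNat % p = 0 ∨ a ^ m.toNat % p = 1
    · rw [if_pos hbrk]
      rw [pvATailNone p i e m hp hi hm hfail (hbrk.symm)]
      simp [PySem.List.index?_eq_idxOf?]
    · rw [if_neg hbrk]
      have hnext : PySem.Int.mod (a ^ m.toNat % p * a) p = a ^ (m + 1).toNat % p := by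
        rw [PySem.Int.mod_eq_emod_of_pos hp0]
        have haa : a % p = a := by
          rw [ha]; exact Int.emod_emod_of_dvd _ dvd_rfl
        calc (a ^ m.toNat % p * a) % p = (a ^ m.toNat % p * (a % p)) % p := by rw [haa]
          _ = (a ^ m.toNat * a) % p := by rw [← Int.mul_emod]
          _ = a ^ (m.toNat + 1) % p := by rw [pow_succ]
          _ = a ^ (m + 1).toNat % p := by rw [show (m + 1).toNat = m.toNat + 1 from by omega]
      rw [hnext]
      have hrec := ih (p - (m + 1)).toNat (by omega) (m + 1) rfl (by omega)
        (fun j hj1 hj2 => by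
          by_cases hjm : j < m
          · exact hfail j hj1 hjm
          · have : j = m := by omega
            subst this; exact hhit)
      rw [hrec]
      cases hidx : PySem.List.index?
          (pvBPowers p a (p - (m + 1)).toNat (a ^ (m + 1).toNat % p)) (p - 1) with
      | none => simp
      | some j =>
        simp only [Option.map_some]
        have : m + 1 + (j : Int) = m + ((j + 1 : Nat) : Int) := by push_cast; ring
        rw [this]

-- the middle loop: A's explicit e-recursion equals findSome? of B's build-then-search body
lemma pvLoopEEq (p i : Int) (hi : 0 ≤ i) :
    ∀ L : List Int, (∀ x ∈ L, 2 ≤ x ∧ x < p) →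
      pvALoopE p i L = L.findSome? (pvBInner p i) := by
  intro L
  induction L with
  | nil => intro _; rfl
  | cons e rest ih =>
    intro h
    obtain ⟨he2, hep⟩ := h e (by simp)
    have hp : (3:Int) ≤ p := by omega
    have hp0 : (0:Int) < p := by omega
    rw [pvALoopE, List.findSome?_cons]
    have ha : PySem.Int.powMod e i.toNat p = e ^ i.toNat % p := by
      show PySem.Int.mod (e ^ i.toNat) p = _
      exact PySem.Int.mod_eq_emod_of_pos hp0
    have hstart : e ^ i.toNat % p = ((e ^ i.toNat % p) ^ (1:Int).toNat) % p := by
      rw [show (1:Int).toNat = 1 from rfl, pow_one, Int.emod_emod_of_dvd _ dvd_rfl]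
    have hin := pvInnerEq p i e hp hi (p - 1).toNat 1 (by omega) (by omega)
      (fun j hj1 hj2 => absurd (lt_of_le_of_lt hj1 hj2) (by omega))
    rw [← hstart] at hin
    unfold pvBInner
    simp only [ha]
    rw [hin]
    cases PySem.List.index? (pvBPowers p (e ^ i.toNat % p) (p - 1).toNat (e ^ i.toNat % p))
        (p - 1) with
    | none => exact ih (fun x hx => h x (by simp [hx]))
    | some j => simp [add_comm]

lemma pvLoopIEq (p : Int) :
    ∀ L : List Int, (∀ x ∈ L, 0 ≤ x) →
      pvALoopI p L = L.findSome? (fun i => (PySem.List.pyRange 2 p 1).findSome? (pvBInner p i)) := by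
  intro L
  induction L with
  | nil => intro _; rfl
  | cons i rest ih =>
    intro h
    rw [pvALoopI, List.findSome?_cons, pvLoopEEq p i (h i (by simp)) _
      (fun x hx => PySem.List.mem_pyRange_one.mp hx)]
    cases (PySem.List.pyRange 2 p 1).findSome? (pvBInner p i) with
    | none => exact ih (fun x hx => h x (by simp [hx]))
    | some r => rfl

-- ===== VERDICT (by name: the statement is the Claim_ definition above) =====
theorem find_euler_triple_spec : Claim_equal_find_euler_triple := by
  intro p _
  unfold Spec_find_euler_triple
  simp only [find_euler_triple, find_euler_triple_alt]
  set targets := (PySem.List.pyRange 0 p 1).filter (fun i => PySem.Int.mod (i * i) p == p - 1)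
    with ht
  by_cases hE : targets = []
  · rw [if_pos hE, hE]; rfl
  · rw [if_neg hE]
    apply pvLoopIEq
    intro x hx
    rw [ht] at hx
    exact (PySem.List.mem_pyRange_one.mp (List.mem_of_mem_filter hx)).1
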